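-- pv_equiv track=rewrite | github.com/danielewhughes/dissertation | evaluators/semantics/meteor_synonym.py | calculate_chunks
-- ===== SOURCE A (Python) =====
-- def calculate_chunks(reference, hypothesis):
--     """
--     Calculate the number of contiguous matching chunks between reference and hypothesis.
--
--     :param reference: List of reference tokens.
--     :param hypothesis: List of hypothesis tokens.
--     :return: Number of chunks.
--     """
--     if not reference or not hypothesis:
--         return 0
--
--     chunks = 0
--     in_chunk = False
--     for i, _ in enumerate(hypothesis):
--         if hypothesis[i] in reference:
--             if not in_chunk:
--                 chunks += 1
--                 in_chunk = True
--         else: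
--             in_chunk = False
--     return chunks
-- ===== SOURCE B (Python) =====
-- def calculate_chunks(reference, hypothesis):
--     ref = set(reference)
--     flags = [t in ref for t in hypothesis]
--     matches = sum(flags)
--     adjacent = sum(1 for a, b in zip(flags, flags[1:]) if a and b)
--     return matches - adjacent
-- ===== Notes on version B (the rewrite author's own statement) =====
-- stated objective: alternative
-- what changed: Replaces the in_chunk state-machine scan by a counting identity: number of chunks = total matched tokens minus number of adjacent matched-matched pairs, computed in staged passes over a precomputed membership-flag list.
import Mathlib
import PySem

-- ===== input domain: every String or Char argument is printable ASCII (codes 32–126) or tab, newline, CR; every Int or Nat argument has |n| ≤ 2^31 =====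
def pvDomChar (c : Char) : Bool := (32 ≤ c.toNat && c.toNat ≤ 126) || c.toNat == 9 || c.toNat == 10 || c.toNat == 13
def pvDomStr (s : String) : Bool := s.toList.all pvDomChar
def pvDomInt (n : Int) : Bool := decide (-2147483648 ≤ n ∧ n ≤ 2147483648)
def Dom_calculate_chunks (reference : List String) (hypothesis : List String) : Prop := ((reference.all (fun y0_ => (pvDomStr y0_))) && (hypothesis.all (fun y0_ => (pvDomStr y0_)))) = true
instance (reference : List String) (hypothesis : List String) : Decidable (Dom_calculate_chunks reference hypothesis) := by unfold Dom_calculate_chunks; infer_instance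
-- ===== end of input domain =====

-- B replaces A's in_chunk state machine by the counting identity
-- chunks = (matched tokens) - (adjacent matched-matched pairs), over a precomputed flag list (objective: alternative).

-- ===== PORT A =====
def calculate_chunks (reference : List String) (hypothesis : List String) : Int :=
  if reference = [] ∨ hypothesis = [] then 0
  else
    ((PySem.List.enumerate hypothesis).foldl (fun (st : Int × Bool) p =>
      if reference.contains (PySem.List.pyGetD hypothesis p.1 "") then
        if !st.2 then (st.1 + 1, true) else st
      else (st.1, false)) ((0 : Int), false)).1

-- ===== PORT B =====
def calculate_chunks_alt (reference : List String) (hypothesis : List String) : Int :=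
  let refSet : PySem.Set String := PySem.Set.ofList reference
  let flags := hypothesis.map (fun t => PySem.Set.contains refSet t)
  let nMatches : Int := flags.foldl (fun acc b => acc + (if b then 1 else 0)) 0
  let adjacent : Int := (List.zip flags flags.tail).foldl
    (fun acc q => acc + (if q.1 && q.2 then 1 else 0)) 0
  nMatches - adjacent

-- ===== PRECONDITION & SPEC =====
def Spec_calculate_chunks (reference : List String) (hypothesis : List String) (out : Int) : Prop := out = calculate_chunks_alt reference hypothesis
instance (reference : List String) (hypothesis : List String) (out : Int) : Decidable (Spec_calculate_chunks reference hypothesis out) := by unfold Spec_calculate_chunks; infer_instance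

-- ===== CLAIM =====
def Claim_equal_calculate_chunks : Prop := ∀ (reference : List String) (hypothesis : List String), Dom_calculate_chunks reference hypothesis → Spec_calculate_chunks reference hypothesis (calculate_chunks reference hypothesis)

-- ===== LEMMAS AND PROOFS =====

-- the one step of A's state machine, on a precomputed flag
def aStep (st : Int × Bool) (b : Bool) : Int × Bool :=
  if b then (if !st.2 then (st.1 + 1, true) else st) else (st.1, false)

-- rising-edge weight of a (prev, cur) pair
def bW (q : Bool × Bool) : Int := if q.2 && !q.1 then 1 else 0

-- cur weight and adjacency weight
def cW (q : Bool × Bool) : Int := if q.2 then 1 else 0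
def dW (q : Bool × Bool) : Int := if q.1 && q.2 then 1 else 0

lemma foldl_snd {α β σ : Type} (g : σ → β → σ) (l : List (α × β)) (init : σ) :
    l.foldl (fun st p => g st p.2) init = (l.map Prod.snd).foldl g init := by
  induction l generalizing init with
  | nil => rfl
  | cons q l ih => simp [List.foldl_cons, ih]

lemma foldl_add_shift {α : Type} (f : α → Int) (l : List α) (a : Int) :
    l.foldl (fun acc q => acc + f q) a = a + l.foldl (fun acc q => acc + f q) 0 := by
  induction l generalizing a with
  | nil => simp
  | cons q l ih => simp only [List.foldl_cons]; rw [ih, ih (0 + f q)]; ring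

lemma aStep_eq (st : Int × Bool) (b : Bool) :
    aStep st b = (st.1 + bW (st.2, b), b) := by
  cases b <;> cases st <;> rename_i c p <;> cases p <;> simp [aStep, bW]

-- core correspondence: A's fold from state (c, p) equals c plus the rising-edge sum with prev p
lemma fold_eq (bs : List Bool) : ∀ (c : Int) (p : Bool),
    (bs.foldl aStep (c, p)).1
      = c + (List.zip (p :: bs) bs).foldl (fun acc q => acc + bW q) 0 := by
  induction bs with
  | nil => intro c p; simp
  | cons b bs ih =>
    intro c p
    have : List.zip (p :: b :: bs) (b :: bs) = (p, b) :: List.zip (b :: bs) bs := rfl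
    rw [this, List.foldl_cons, List.foldl_cons, aStep_eq, ih,
        foldl_add_shift bW ((b :: bs).zip bs) (0 + bW (p, b))]
    ring

-- A's loop over enumerate, with hypothesis[i] looked up, is the fold of aStep over the flags
lemma aFold_eq_flags (reference hypothesis : List String) (st : Int × Bool) :
    (PySem.List.enumerate hypothesis).foldl (fun (st : Int × Bool) p =>
        if reference.contains (PySem.List.pyGetD hypothesis p.1 "") then
          if !st.2 then (st.1 + 1, true) else st
        else (st.1, false)) st
      = (hypothesis.map (fun t => reference.contains t)).foldl aStep st := by
  rw [PySem.List.foldl_congr_mem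
        (g := fun (st : Int × Bool) (p : Int × String) => aStep st (reference.contains p.2))]
  · rw [foldl_snd (fun (st : Int × Bool) b => aStep st (reference.contains b))
          (PySem.List.enumerate hypothesis) st,
        PySem.List.map_snd_enumerate, List.foldl_map]
  · intro acc x hx
    rcases (PySem.List.mem_enumerate_iff _ _ _).1 hx with ⟨k, hk, rfl⟩
    simp [aStep, List.getElem?_eq_getElem hk]

-- sum of a pointwise difference splits into a difference of sums
lemma foldl_add_sub {α : Type} (f g : α → Int) (l : List α) :
    l.foldl (fun acc q => acc + (f q - g q)) 0
      = l.foldl (fun acc q => acc + f q) 0 - l.foldl (fun acc q => acc + g q) 0 := by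
  induction l with
  | nil => simp
  | cons q l ih =>
    simp only [List.foldl_cons]
    rw [foldl_add_shift (fun q => f q - g q), foldl_add_shift f, foldl_add_shift g, ih]
    ring

-- the rising-edge weight is cur minus adjacency
lemma bW_split (q : Bool × Bool) : bW q = cW q - dW q := by
  rcases q with ⟨p, b⟩; cases p <;> cases b <;> rfl

-- the cur-sum over zip (p :: bs) bs is the flag-sum over bs
lemma cur_sum (bs : List Bool) (p : Bool) :
    (List.zip (p :: bs) bs).foldl (fun acc q => acc + cW q) 0
      = bs.foldl (fun acc b => acc + (if b then 1 else 0)) 0 := by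
  simp only [cW]
  rw [foldl_snd (fun (acc : Int) (b : Bool) => acc + (if b then 1 else 0)) (List.zip (p :: bs) bs) 0,
      List.map_snd_zip (by simp)]

-- the adjacency sum with a false head equals the sum over zip bs bs.tail
lemma adj_sum (bs : List Bool) :
    (List.zip (false :: bs) bs).foldl (fun acc q => acc + dW q) 0
      = (List.zip bs bs.tail).foldl (fun acc q => acc + dW q) 0 := by
  cases bs with
  | nil => rfl
  | cons b t =>
    have : List.zip (false :: b :: t) (b :: t) = (false, b) :: List.zip (b :: t) t := rfl
    rw [this, List.foldl_cons]
    simp [dW]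

-- a 0/1-sum vanishes when every weight is 0
lemma foldl_add_zero {α : Type} (f : α → Int) (l : List α) (h : ∀ x ∈ l, f x = 0) :
    l.foldl (fun acc q => acc + f q) 0 = 0 := by
  induction l with
  | nil => rfl
  | cons q l ih =>
    simp only [List.foldl_cons]
    rw [foldl_add_shift f, h q (by simp), ih (fun x hx => h x (by simp [hx]))]
    simp

-- with an empty reference every flag is false and B returns 0
lemma alt_ref_nil (hypothesis : List String) : calculate_chunks_alt [] hypothesis = 0 := by
  simp only [calculate_chunks_alt]
  have h1 := foldl_add_zero (fun (b : Bool) => if b then (1 : Int) else 0)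
      (hypothesis.map (fun t => PySem.Set.contains (PySem.Set.ofList ([] : List String)) t))
      (by intro x hx; rcases List.mem_map.1 hx with ⟨t, _, rfl⟩; simp)
  have h2 := foldl_add_zero dW
      (List.zip (hypothesis.map (fun t => PySem.Set.contains (PySem.Set.ofList ([] : List String)) t))
        (hypothesis.map (fun t => PySem.Set.contains (PySem.Set.ofList ([] : List String)) t)).tail)
      (by
        intro q hq
        have := (List.of_mem_zip hq).1
        rcases List.mem_map.1 this with ⟨t, _, hc⟩
        rcases q with ⟨a, b⟩
        simp at hc
        simp [dW, ← hc])
  simp only [dW] at h2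
  rw [h1, h2]
  rfl

-- ===== VERDICT =====
theorem calculate_chunks_spec : Claim_equal_calculate_chunks := by
  intro reference hypothesis _
  unfold Spec_calculate_chunks calculate_chunks
  split
  · rename_i h
    rcases h with h | h
    · subst h; exact (alt_ref_nil hypothesis).symm
    · subst h; simp [calculate_chunks_alt]
  · simp only [calculate_chunks_alt]
    rw [aFold_eq_flags, fold_eq]
    have hm : hypothesis.map (fun t => PySem.Set.contains (PySem.Set.ofList reference) t)
        = hypothesis.map (fun t => reference.contains t) := by
      simp
    rw [hm]
    have hb := foldl_add_sub cW dW
      (List.zip (false :: hypothesis.map (fun t => reference.contains t))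
        (hypothesis.map (fun t => reference.contains t)))
    simp only [← bW_split] at hb
    rw [hb, cur_sum, adj_sum]
    simp only [dW]
    ring
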